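-- pv_equiv track=rewrite | github.com/alimyust/16-bit_MCPU-Assembler | src/RISC_asm/parser.py | _flatten_operand_parts
-- ===== SOURCE A (Python) =====
-- def _flatten_operand_parts(text: str) -> list[str]:
--     parts: list[str] = []
--     current: list[str] = []
--     bracket_depth = 0
--
--     for char in text:
--         if char == "[":
--             bracket_depth += 1
--             current.append(char)
--             continue
--         if char == "]":
--             bracket_depth -= 1
--             current.append(char)
--             continue
--         if char == "," and bracket_depth == 0:
--             token = "".join(current).strip()
--             if token:
--                 parts.extend(_expand_operand_token(token))
--             current = []
--             continue
--         current.append(char)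
--
--     token = "".join(current).strip()
--     if token:
--         parts.extend(_expand_operand_token(token))
--
--     return parts
--
-- def _expand_operand_token(token: str) -> list[str]:
--     if token.startswith("[") and token.endswith("]"):
--         inner = token[1:-1].strip()
--         return _flatten_operand_parts(inner)
--     return [token]
-- ===== SOURCE B (Python) =====
-- def _split_top(s: str) -> list[str]:
--     """Cut s into raw tokens at commas that sit outside any brackets."""
--     tokens: list[str] = []
--     cur: list[str] = []
--     depth = 0
--     for ch in s:
--         if ch == "[":
--             depth += 1
--             cur.append(ch)
--         elif ch == "]":
--             depth -= 1
--             cur.append(ch)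
--         elif ch == "," and depth == 0:
--             tokens.append("".join(cur))
--             cur = []
--         else:
--             cur.append(ch)
--     tokens.append("".join(cur))
--     return tokens
--
--
-- def _flatten_operand_parts(text: str) -> list[str]:
--     # Iterative worklist: each item is (needs_flattening, string).
--     out: list[str] = []
--     work: list[tuple[bool, str]] = [(True, text)]
--     while work:
--         flatten, s = work.pop(0)
--         if not flatten:
--             out.append(s)
--             continue
--         items: list[tuple[bool, str]] = []
--         for raw in _split_top(s):
--             token = raw.strip()
--             if not token:
--                 continue
--             if token.startswith("[") and token.endswith("]"):
--                 items.append((True, token[1:-1].strip()))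
--             else:
--                 items.append((False, token))
--         work[:0] = items
--     return out
-- ===== Notes on version B (the rewrite author's own statement) =====
-- stated objective: alternative
-- what changed: Replaces A's mutual recursion between _flatten_operand_parts and _expand_operand_token with an iterative worklist machine over a separate top-level-comma tokenizer: each pending string is tokenized, plain tokens are emitted and bracketed tokens splice their stripped inner text back into the worklist in order.
import Mathlib
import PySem

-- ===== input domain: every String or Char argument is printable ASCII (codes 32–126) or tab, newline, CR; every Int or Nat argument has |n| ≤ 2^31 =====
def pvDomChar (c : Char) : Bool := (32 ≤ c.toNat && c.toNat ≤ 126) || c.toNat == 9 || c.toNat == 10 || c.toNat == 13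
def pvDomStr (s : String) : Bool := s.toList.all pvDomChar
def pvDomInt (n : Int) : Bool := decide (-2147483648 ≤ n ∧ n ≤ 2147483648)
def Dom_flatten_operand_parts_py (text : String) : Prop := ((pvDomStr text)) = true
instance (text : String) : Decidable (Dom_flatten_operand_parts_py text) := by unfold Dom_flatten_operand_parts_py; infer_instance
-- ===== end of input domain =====

-- B replaces A's mutual recursion (_flatten_operand_parts/_expand_operand_token) by an
-- iterative worklist machine over a separate top-level-comma tokenizer (objective: alternative).
-- Both ports thread a fuel argument as a totality guard only; fuel adequacy is proved below.

-- ===== PORT A =====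
-- A's for-loop over the characters, with the token expander passed in (the mutual recursion
-- between the two Python helpers is closed by the fuel-indexed pair below).
def loopAH (expand : List Char → List String) : List Char → List String → List Char → Int → List String
  | [], parts, current, _ =>
    let token := PySem.Chars.strip current
    if token ≠ [] then parts ++ expand token else parts
  | c :: rest, parts, current, depth =>
    if c = '[' then loopAH expand rest parts (current ++ [c]) (depth + 1)
    else if c = ']' then loopAH expand rest parts (current ++ [c]) (depth - 1)
    else if c = ',' ∧ depth = 0 then
      let token := PySem.Chars.strip current
      loopAH expand rest (if token ≠ [] then parts ++ expand token else parts) [] depth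
    else loopAH expand rest parts (current ++ [c]) depth

mutual
-- _flatten_operand_parts (fueled: each unwrap level strictly shrinks the text, see pvAdequacyA below)
def flattenAF : Nat → List Char → List String
  | 0, _ => []
  | fuel + 1, s => loopAH (expandAF fuel) s [] [] 0

-- _expand_operand_token
def expandAF : Nat → List Char → List String
  | 0, _ => []
  | fuel + 1, token =>
    if PySem.Chars.startswith token ['['] = true ∧ PySem.Chars.endswith token [']'] = true then
      flattenAF fuel (PySem.Chars.strip (PySem.List.slice token (some 1) (some (-1))))
    else [String.ofList token]
end

def flatten_operand_parts_py (text : String) : List String :=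
  flattenAF (text.toList.length + 2) text.toList

-- ===== PORT B =====
-- _split_top: cut a string into raw tokens at commas outside brackets
def splitTopB : List Char → List Char → Int → List (List Char)
  | [], cur, _ => [cur]
  | c :: rest, cur, depth =>
    if c = '[' then splitTopB rest (cur ++ [c]) (depth + 1)
    else if c = ']' then splitTopB rest (cur ++ [c]) (depth - 1)
    else if c = ',' ∧ depth = 0 then cur :: splitTopB rest [] depth
    else splitTopB rest (cur ++ [c]) depth

-- one raw token -> worklist item (None = dropped empty token)
def itemB (raw : List Char) : Option (Bool × List Char) :=
  let token := PySem.Chars.strip raw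
  if token = [] then none
  else if PySem.Chars.startswith token ['['] = true ∧ PySem.Chars.endswith token [']'] = true then
    some (true, PySem.Chars.strip (PySem.List.slice token (some 1) (some (-1))))
  else some (false, token)

def itemsOf (s : List Char) : List (Bool × List Char) :=
  (splitTopB s [] 0).filterMap itemB

-- the while-loop over the worklist (fueled: 2*len+3 iterations always suffice, see pvAdequacyB below)
def processBF : Nat → List (Bool × List Char) → List String → List String
  | 0, _, out => out
  | _ + 1, [], out => out
  | fuel + 1, (false, t) :: rest, out => processBF fuel rest (out ++ [String.ofList t])
  | fuel + 1, (true, s) :: rest, out => processBF fuel (itemsOf s ++ rest) out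

def flatten_operand_parts_py_alt (text : String) : List String :=
  processBF (2 * text.toList.length + 3) [(true, text.toList)] []

-- ===== PRECONDITION & SPEC =====
def Spec_flatten_operand_parts_py (text : String) (out : List String) : Prop := out = flatten_operand_parts_py_alt text
instance (text : String) (out : List String) : Decidable (Spec_flatten_operand_parts_py text out) := by unfold Spec_flatten_operand_parts_py; infer_instance

-- ===== CLAIM (what is proved, stated in full; the proofs are below) =====
def Claim_equal_flatten_operand_parts_py : Prop := ∀ (text : String), Dom_flatten_operand_parts_py text → Spec_flatten_operand_parts_py text (flatten_operand_parts_py text)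

-- ===== LEMMAS AND PROOFS =====

theorem pvStripLen (cs : List Char) : (PySem.Chars.strip cs).length ≤ cs.length := by
  simp only [PySem.Chars.strip, PySem.Chars.rstrip, PySem.Chars.lstrip, List.length_reverse]
  calc (List.dropWhile PySem.Chars.isspace (List.dropWhile PySem.Chars.isspace cs).reverse).length
      ≤ (List.dropWhile PySem.Chars.isspace cs).reverse.length := List.length_dropWhile_le _ _
    _ ≤ cs.length := by simpa using List.length_dropWhile_le PySem.Chars.isspace cs

-- a token that starts with '[' and ends with ']' has at least the two bracket characters
theorem pvTokLen2 (t : List Char)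
    (h1 : PySem.Chars.startswith t ['['] = true) (h2 : PySem.Chars.endswith t [']'] = true) :
    2 ≤ t.length := by
  have hp : ['['] <+: t := by rw [← PySem.Chars.startswith_iff]; exact h1
  have hs : [']'] <:+ t := by rw [← PySem.Chars.endswith_iff]; exact h2
  rcases t with _ | ⟨a, _ | ⟨b, l⟩⟩
  · simp at hp
  · obtain ⟨u, hu⟩ := hp
    obtain ⟨v, hv⟩ := hs
    simp only [List.singleton_append] at hu
    have ha : '[' = a := by injection hu
    have hb : ']' = a := by
      rcases v with _ | ⟨x, xs⟩
      · simp only [List.nil_append] at hv; injection hv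
      · simp only [List.cons_append] at hv
        injection hv with _ h'
        exact absurd h' (by simp)
    rw [← ha] at hb; simp at hb
  · simp

-- the bracketed token's stripped inner text is strictly shorter than the token
theorem pvInnerLt (t : List Char)
    (h1 : PySem.Chars.startswith t ['['] = true) (h2 : PySem.Chars.endswith t [']'] = true) :
    (PySem.Chars.strip (PySem.List.slice t (some 1) (some (-1)))).length + 2 ≤ t.length := by
  have ht2 := pvTokLen2 t h1 h2
  have h := pvStripLen (PySem.List.slice t (some 1) (some (-1)))
  have h2' := PySem.List.length_slice t 1 (-1)
  have hc1 := PySem.List.clampIdx_neg_one t.length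
  have hc2 := PySem.List.clampIdx_natCast t.length 1
  simp only [Nat.cast_one] at hc2
  omega

-- the (fuel-free) semantics both fueled ports are proved equal to
mutual
def flattenS (s : List Char) : List String :=
  loopS s [] [] 0
termination_by (s.length, s.length + 2)
decreasing_by
  apply Prod.Lex.right' <;> simp

def loopS (cs : List Char) (parts : List String) (current : List Char) (depth : Int) : List String :=
  match cs with
  | [] =>
    let token := PySem.Chars.strip current
    if token ≠ [] then parts ++ expandS token else parts
  | c :: rest =>
    if c = '[' then loopS rest parts (current ++ [c]) (depth + 1)
    else if c = ']' then loopS rest parts (current ++ [c]) (depth - 1)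
    else if c = ',' ∧ depth = 0 then
      let token := PySem.Chars.strip current
      loopS rest (if token ≠ [] then parts ++ expandS token else parts) [] depth
    else loopS rest parts (current ++ [c]) depth
termination_by (cs.length + current.length, cs.length + 1)
decreasing_by
  all_goals
    have hs := pvStripLen current
    apply Prod.Lex.right' <;>
      (simp only [List.length_append, List.length_cons, List.length_nil]; omega)

def expandS (token : List Char) : List String :=
  if PySem.Chars.startswith token ['['] = true ∧ PySem.Chars.endswith token [']'] = true then
    flattenS (PySem.Chars.strip (PySem.List.slice token (some 1) (some (-1))))
  else [String.ofList token]
termination_by (token.length, 0)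
decreasing_by
  rename_i hbr
  exact Prod.Lex.left _ _ (by have := pvInnerLt token hbr.1 hbr.2; omega)
end

-- the loop only ever hands the expander tokens no longer than the text it has seen
theorem loopAH_congr (cs : List Char) : ∀ (expand : List Char → List String)
    (parts : List String) (cur : List Char) (depth : Int),
    (∀ t, t.length ≤ cs.length + cur.length → expand t = expandS t) →
    loopAH expand cs parts cur depth = loopS cs parts cur depth := by
  induction cs with
  | nil =>
    intro expand parts cur depth h
    simp only [loopAH, loopS]
    rw [h _ (by simpa using pvStripLen cur)]
  | cons c rest ih =>
    intro expand parts cur depth h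
    simp only [loopAH, loopS]
    split
    · exact ih expand parts (cur ++ [c]) (depth + 1) (by intro t ht; exact h t (by simp at ht ⊢; omega))
    · split
      · exact ih expand parts (cur ++ [c]) (depth - 1) (by intro t ht; exact h t (by simp at ht ⊢; omega))
      · split
        · rw [h _ (by have := pvStripLen cur; simp; omega)]
          exact ih expand _ [] depth (by intro t ht; exact h t (by simp at ht ⊢; omega))
        · exact ih expand parts (cur ++ [c]) depth (by intro t ht; exact h t (by simp at ht ⊢; omega))

-- fuel adequacy for port A: enough fuel computes the semantics
theorem pvAdequacyA : ∀ (fuel : Nat),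
    (∀ s : List Char, s.length + 2 ≤ fuel → flattenAF fuel s = flattenS s) ∧
    (∀ t : List Char, t.length < fuel → expandAF fuel t = expandS t) := by
  intro fuel
  induction fuel with
  | zero => exact ⟨fun s hs => by omega, fun t ht => by omega⟩
  | succ f ih =>
    constructor
    · intro s hs
      rw [flattenAF, flattenS]
      exact loopAH_congr s (expandAF f) [] [] 0 (fun t ht => ih.2 t (by simp at ht; omega))
    · intro t ht
      rw [expandAF, expandS]
      split
      · rename_i hbr
        exact ih.1 _ (by have := pvInnerLt t hbr.1 hbr.2; omega)
      · rfl

-- worklist cost: each loop iteration strictly decreases it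
def costItem : Bool × List Char → Nat
  | (true, s) => 2 * s.length + 2
  | (false, _) => 1

theorem pvItemCost (raw : List Char) (it : Bool × List Char) (h : itemB raw = some it) :
    costItem it ≤ 2 * raw.length := by
  unfold itemB at h
  have hst := pvStripLen raw
  by_cases h0 : PySem.Chars.strip raw = []
  · simp [h0] at h
  · simp only [h0, if_false] at h
    split at h
    · rename_i hbr
      cases h
      have := pvInnerLt (PySem.Chars.strip raw) hbr.1 hbr.2
      simp only [costItem]
      omega
    · cases h
      simp only [costItem]
      have h1 : 1 ≤ (PySem.Chars.strip raw).length := by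
        cases hx : PySem.Chars.strip raw with
        | nil => exact absurd hx h0
        | cons a l => simp
      omega

theorem pvSplitLen (cs cur : List Char) (depth : Int) :
    ((splitTopB cs cur depth).map List.length).sum ≤ cs.length + cur.length := by
  induction cs generalizing cur depth with
  | nil => simp [splitTopB]
  | cons c rest ih =>
    simp only [splitTopB]
    split
    · have := ih (cur ++ [c]) (depth + 1); simp at this ⊢; omega
    · split
      · have := ih (cur ++ [c]) (depth - 1); simp at this ⊢; omega
      · split
        · have := ih [] depth; simp at this ⊢; omega
        · have := ih (cur ++ [c]) depth; simp at this ⊢; omega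

theorem pvItemsCost (s : List Char) : ((itemsOf s).map costItem).sum ≤ 2 * s.length := by
  unfold itemsOf
  have hgen : ∀ (raws : List (List Char)),
      ((raws.filterMap itemB).map costItem).sum ≤ 2 * (raws.map List.length).sum := by
    intro raws
    induction raws with
    | nil => simp
    | cons r rs ih =>
      cases h : itemB r with
      | none => simp [h]; omega
      | some it =>
        have := pvItemCost r it h
        simp [h]; omega
  have h1 := hgen (splitTopB s [] 0)
  have h2 := pvSplitLen s [] 0
  simp at h1 h2 ⊢
  omega

-- the value one raw top-level token contributes to the result
def expandTok (raw : List Char) : List String :=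
  let token := PySem.Chars.strip raw
  if token = [] then []
  else if PySem.Chars.startswith token ['['] = true ∧ PySem.Chars.endswith token [']'] = true then
    flattenS (PySem.Chars.strip (PySem.List.slice token (some 1) (some (-1))))
  else [String.ofList token]

-- the semantics' loop emits exactly the expansions of B's tokenizer's tokens
theorem loopS_eq (cs : List Char) : ∀ (parts : List String) (cur : List Char) (depth : Int),
    loopS cs parts cur depth = parts ++ (splitTopB cs cur depth).flatMap expandTok := by
  induction cs with
  | nil =>
    intro parts cur depth
    simp only [loopS, splitTopB, List.flatMap_cons, List.flatMap_nil, List.append_nil, expandTok]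
    by_cases h : PySem.Chars.strip cur = []
    · simp [h]
    · simp [h, expandS]
  | cons c rest ih =>
    intro parts cur depth
    simp only [loopS, splitTopB]
    split
    · exact ih parts (cur ++ [c]) (depth + 1)
    · split
      · exact ih parts (cur ++ [c]) (depth - 1)
      · split
        · rw [ih _ [] depth]
          simp only [List.flatMap_cons, expandTok, expandS]
          by_cases h : PySem.Chars.strip cur = []
          · simp [h]
          · simp [h]
        · exact ih parts (cur ++ [c]) depth

def denB : Bool × List Char → List String
  | (true, s) => flattenS s
  | (false, t) => [String.ofList t]

theorem denB_itemB (raw : List Char) : (itemB raw).elim [] denB = expandTok raw := by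
  unfold itemB expandTok
  by_cases h0 : PySem.Chars.strip raw = []
  · simp [h0]
  · simp only [h0, if_false]
    split <;> simp [denB]

theorem flatMap_itemB (raws : List (List Char)) :
    (raws.filterMap itemB).flatMap denB = raws.flatMap expandTok := by
  induction raws with
  | nil => simp
  | cons r rs ih =>
    rw [List.flatMap_cons, List.filterMap_cons, ← denB_itemB r]
    cases h : itemB r with
    | none => simpa [h] using ih
    | some it => simp [List.flatMap_cons, ih]

theorem itemsOf_den (s : List Char) : (itemsOf s).flatMap denB = flattenS s := by
  unfold itemsOf
  rw [flatMap_itemB, flattenS, loopS_eq]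
  simp

-- fuel adequacy for port B: enough fuel drains the worklist to the semantics
theorem pvAdequacyB : ∀ (fuel : Nat) (work : List (Bool × List Char)) (out : List String),
    (work.map costItem).sum < fuel → processBF fuel work out = out ++ work.flatMap denB := by
  intro fuel
  induction fuel with
  | zero => intro work out h; omega
  | succ f ih =>
    intro work out h
    match work with
    | [] => simp [processBF]
    | (false, t) :: rest =>
      rw [processBF, ih rest _ (by simp [costItem] at h ⊢; omega)]
      simp [denB]
    | (true, s) :: rest =>
      rw [processBF, ih (itemsOf s ++ rest) _ ?_]
      · simp only [List.flatMap_append, List.flatMap_cons]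
        rw [itemsOf_den]
        simp [denB]
      · have hc := pvItemsCost s
        simp only [List.map_append, List.sum_append, List.map_cons, List.sum_cons, costItem] at h ⊢
        omega

-- ===== VERDICT (by name: the statement is the Claim_ definition above) =====
theorem flatten_operand_parts_py_spec : Claim_equal_flatten_operand_parts_py := by
  intro text _
  unfold Spec_flatten_operand_parts_py flatten_operand_parts_py flatten_operand_parts_py_alt
  rw [(pvAdequacyA (text.toList.length + 2)).1 text.toList (by omega),
      pvAdequacyB _ _ _ (by simp [costItem])]
  simp [denB]
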